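-- pv_equiv track=rewrite | github.com/bhrebec/tennis-datafier | drawsheet.py | drawsheet_print_draw
-- ===== SOURCE A (Python) =====
-- def drawsheet_print_draw(draw, status):
--     """
--     Return a human readable representation of the drawsheet
--     """
--     y_top_skip = 0
--     y_inner_skip = 1
--     x = 8
--     y = 0
--     n = 0
--     output = []
--     for rnd in draw:
--         y = y_top_skip
--
--         if n == 0:
--             for p in rnd:
--                 try:
--                     s = status[p[0]]
--                     if s[1] == None:
--                         ctry = ''
--                     else:
--                         ctry = s[1]
--                     if s[0] == None:
--                         stat = ''
--                     else:
--                         stat = s[0]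
--
--                     p_out = "{:2} {} - {}".format(stat, p[0], ctry)
--                 except KeyError:
--                     p_out = "   " + p[0]
--                 output += [p_out]
--                 output += ['']
--         else:
--             for p in rnd:
--                 comma_pos = p[0].find(',')
--                 if comma_pos == -1:
--                     name = p[0]
--                 else:
--                     name = p[0][:comma_pos + 3]
--
--                 output[y] = "{}{} ({})".format(' ' * x, name, p[2])
--
--                 y += y_inner_skip + 1
--
--             x += 8
--
--         y_top_skip = y_inner_skip
--         y_inner_skip = y_inner_skip * 2 + 1
--         n+=1
--
--     return '\n'.join(output)
-- ===== SOURCE B (Python) =====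
-- def drawsheet_print_draw(draw, status):
--     """
--     Return a human readable representation of the drawsheet
--     """
--     if not draw:
--         return ''
--     first = draw[0]
--     lines = []
--     for y in range(2 * len(first)):
--         if y % 2 == 0:
--             p = first[y // 2]
--             try:
--                 s = status[p[0]]
--                 stat = s[0] if s[0] is not None else ''
--                 ctry = s[1] if s[1] is not None else ''
--                 lines.append("{:2} {} - {}".format(stat, p[0], ctry))
--             except KeyError:
--                 lines.append("   " + p[0])
--         else:
--             # line y belongs to round n = v2(y+1), player i = (odd part - 1) // 2
--             m, n = y + 1, 0
--             while m % 2 == 0: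
--                 m //= 2
--                 n += 1
--             i = m // 2
--             if n < len(draw) and i < len(draw[n]):
--                 p = draw[n][i]
--                 c = p[0].find(',')
--                 name = p[0] if c == -1 else p[0][:c + 3]
--                 lines.append("{}{} ({})".format(' ' * (8 * n), name, p[2]))
--             else:
--                 lines.append('')
--     return '\n'.join(lines)
-- ===== Notes on version B (the rewrite author's own statement) =====
-- stated objective: alternative
-- what changed: Inverts the traversal: instead of A's input-driven pass mutating an output list round by round with running skip/indent counters, B computes each output line independently from its index y, recovering the owning round n and player i from the 2-adic valuation of y+1 (round-n players sit exactly at y = 2^n*(2i+1)-1).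
import Mathlib
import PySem

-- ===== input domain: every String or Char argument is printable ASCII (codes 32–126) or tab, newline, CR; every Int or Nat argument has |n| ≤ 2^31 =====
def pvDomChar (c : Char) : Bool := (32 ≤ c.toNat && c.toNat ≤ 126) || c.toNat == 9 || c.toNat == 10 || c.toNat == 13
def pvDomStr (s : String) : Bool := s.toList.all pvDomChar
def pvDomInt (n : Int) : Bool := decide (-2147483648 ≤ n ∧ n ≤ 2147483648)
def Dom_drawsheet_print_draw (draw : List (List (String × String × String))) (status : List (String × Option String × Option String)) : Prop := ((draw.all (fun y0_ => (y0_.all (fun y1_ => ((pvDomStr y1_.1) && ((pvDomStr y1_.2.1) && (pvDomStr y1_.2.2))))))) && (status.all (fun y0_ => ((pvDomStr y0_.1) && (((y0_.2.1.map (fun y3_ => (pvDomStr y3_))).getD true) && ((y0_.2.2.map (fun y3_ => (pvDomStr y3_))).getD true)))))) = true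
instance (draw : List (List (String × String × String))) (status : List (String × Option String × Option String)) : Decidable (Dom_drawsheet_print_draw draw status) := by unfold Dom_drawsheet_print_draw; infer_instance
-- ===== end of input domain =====

-- B inverts the traversal: A writes players into a mutable output list round by round with
-- running skip/indent counters; B computes each output line directly from its index y, recovering
-- the owning round n and player i from the 2-adic valuation of y+1.  Objective: alternative.
-- Pre_ excludes exactly the inputs where A raises IndexError (a later-round slot index falling
-- at or beyond the 2*len(draw[0]) lines created by round 0).

-- ===== PORT A =====
-- "{:2}".format(stat): left-justify to minimum width 2
def pvA_ljust2 (cs : List Char) : List Char := cs ++ List.replicate (2 - cs.length) ' '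

-- the n == 0 branch body: one player's line (try status[p[0]] / except KeyError)
def pvA_first (status : List (String × Option String × Option String)) (p : String × String × String) : List Char :=
  match PySem.Dict.get? (PySem.Dict.mk status) p.1 with
  | none => ' ' :: ' ' :: ' ' :: p.1.toList
  | some s =>
      let ctry := match s.2 with | none => "" | some c => c
      let stat := match s.1 with | none => "" | some c => c
      pvA_ljust2 stat.toList ++ ' ' :: p.1.toList ++ ' ' :: '-' :: ' ' :: ctry.toList

-- the inner for-loop of the else branch: mutable y stepping by y_inner_skip + 1
def pvA_inner (rnd : List (String × String × String)) (y yInner x : Nat)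
    (output : List (List Char)) : List (List Char) :=
  match rnd with
  | [] => output
  | p :: rest =>
      let commaPos := PySem.Str.find p.1 ","
      let name := if commaPos = -1 then p.1.toList
                  else (PySem.Str.slice p.1 none (some (commaPos + 3))).toList
      let line := List.replicate x ' ' ++ name ++ ' ' :: '(' :: p.2.2.toList ++ [')']
      pvA_inner rest (y + yInner + 1) yInner x (output.set y line)

-- the outer for-loop with its running state
def pvA_loop (status : List (String × Option String × Option String))
    (rounds : List (List (String × String × String)))
    (yTop yInner x n : Nat) (output : List (List Char)) : List (List Char) :=
  match rounds with
  | [] => output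
  | rnd :: rest =>
      if n = 0 then
        pvA_loop status rest yInner (yInner * 2 + 1) x (n + 1)
          (rnd.foldl (fun acc p => acc ++ [pvA_first status p, []]) output)
      else
        pvA_loop status rest yInner (yInner * 2 + 1) (x + 8) (n + 1)
          (pvA_inner rnd yTop yInner x output)

def drawsheet_print_draw (draw : List (List (String × String × String))) (status : List (String × Option String × Option String)) : String :=
  String.ofList (PySem.Chars.join ['\n'] (pvA_loop status draw 0 1 8 0 []))

-- ===== PORT B =====
-- "{:2}".format(stat)
def pvB_ljust2 (cs : List Char) : List Char := cs ++ List.replicate (2 - cs.length) ' '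

-- first-round line (try status[p[0]] / except KeyError)
def pvB_first (status : List (String × Option String × Option String)) (p : String × String × String) : List Char :=
  match PySem.Dict.get? (PySem.Dict.mk status) p.1 with
  | none => ' ' :: ' ' :: ' ' :: p.1.toList
  | some s =>
      let stat := match s.1 with | none => "" | some c => c
      let ctry := match s.2 with | none => "" | some c => c
      pvB_ljust2 stat.toList ++ ' ' :: p.1.toList ++ ' ' :: '-' :: ' ' :: ctry.toList

-- the while loop 'while m % 2 == 0: m //= 2; n += 1'  →  (final m, n); the m ≠ 0 guard
-- only makes the recursion total (python is called with m = y+1 ≥ 1)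
def pvB_oddN (m : Nat) : Nat × Nat :=
  if h : m % 2 = 0 ∧ m ≠ 0 then
    let r := pvB_oddN (m / 2)
    (r.1, r.2 + 1)
  else (m, 0)
decreasing_by omega

-- one output line, computed from its index y
def pvB_line (draw : List (List (String × String × String))) (first : List (String × String × String))
    (status : List (String × Option String × Option String)) (y : Nat) : List Char :=
  if y % 2 = 0 then
    pvB_first status (first.getD (y / 2) ("", "", ""))
  else
    let r := pvB_oddN (y + 1)
    let n := r.2
    let i := r.1 / 2
    if n < draw.length ∧ i < (draw.getD n []).length then
      let p := (draw.getD n []).getD i ("", "", "")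
      let c := PySem.Str.find p.1 ","
      let name := if c = -1 then p.1.toList else (PySem.Str.slice p.1 none (some (c + 3))).toList
      List.replicate (8 * n) ' ' ++ name ++ ' ' :: '(' :: p.2.2.toList ++ [')']
    else []

def drawsheet_print_draw_alt (draw : List (List (String × String × String))) (status : List (String × Option String × Option String)) : String :=
  match draw with
  | [] => ""
  | first :: _ =>
      String.ofList (PySem.Chars.join ['\n']
        ((List.range (2 * first.length)).map (pvB_line draw first status)))

-- ===== PRECONDITION & SPEC =====
-- Pre_ excludes exactly the inputs on which Python A raises IndexError: a round n ≥ 1 player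
-- slot 2^n-1 + i*2^(n+1) at or beyond the 2*len(draw[0]) output lines built by round 0.
def Pre_drawsheet_print_draw (draw : List (List (String × String × String))) (status : List (String × Option String × Option String)) : Prop :=
  ∀ n, n < draw.length → 1 ≤ n → ∀ i, i < (draw.getD n []).length →
    2 ^ n - 1 + i * 2 ^ (n + 1) < 2 * (draw.headD []).length
instance (draw : List (List (String × String × String))) (status : List (String × Option String × Option String)) : Decidable (Pre_drawsheet_print_draw draw status) := by unfold Pre_drawsheet_print_draw; infer_instance
def pvWitness_drawsheet_print_draw : (List (List (String × String × String))) × (List (String × Option String × Option String)) :=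
  ([[("Smith, J", "", ""), ("Lee", "", "")], [("Smith, J", "", "6-4 6-4")]],
   [("Lee", some "Q", some "USA")])

def Spec_drawsheet_print_draw (draw : List (List (String × String × String))) (status : List (String × Option String × Option String)) (out : String) : Prop := out = drawsheet_print_draw_alt draw status
instance (draw : List (List (String × String × String))) (status : List (String × Option String × Option String)) (out : String) : Decidable (Spec_drawsheet_print_draw draw status out) := by unfold Spec_drawsheet_print_draw; infer_instance

-- ===== CLAIM =====
def Claim_equal_drawsheet_print_draw : Prop := ∀ (draw : List (List (String × String × String))) (status : List (String × Option String × Option String)), Dom_drawsheet_print_draw draw status → Pre_drawsheet_print_draw draw status → Spec_drawsheet_print_draw draw status (drawsheet_print_draw draw status)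

-- ===== LEMMAS AND PROOFS =====

-- the formatted line a round-n (n ≥ 1) player produces
def pvLineOf (x : Nat) (p : String × String × String) : List Char :=
  let commaPos := PySem.Str.find p.1 ","
  let name := if commaPos = -1 then p.1.toList
              else (PySem.Str.slice p.1 none (some (commaPos + 3))).toList
  List.replicate x ' ' ++ name ++ ' ' :: '(' :: p.2.2.toList ++ [')']

theorem pvA_first_eq (status : List (String × Option String × Option String))
    (p : String × String × String) : pvA_first status p = pvB_first status p := by
  unfold pvA_first pvB_first pvA_ljust2 pvB_ljust2
  cases PySem.Dict.get? (PySem.Dict.mk status) p.1 <;> rfl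

theorem pvA_inner_length (rnd : List (String × String × String)) (y yInner x : Nat)
    (out : List (List Char)) : (pvA_inner rnd y yInner x out).length = out.length := by
  induction rnd generalizing y out with
  | nil => rfl
  | cons p rest ih => simp only [pvA_inner]; rw [ih, List.length_set]

theorem pvA_loop_length (status : List (String × Option String × Option String))
    (rounds : List (List (String × String × String))) (yTop yInner x n : Nat)
    (hn : n ≠ 0) (out : List (List Char)) :
    (pvA_loop status rounds yTop yInner x n out).length = out.length := by
  induction rounds generalizing yTop yInner x n out with
  | nil => rfl
  | cons rnd rest ih =>
      simp only [pvA_loop, hn, if_false]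
      rw [ih _ _ _ _ (by omega), pvA_inner_length]

-- a write sequence misses q
theorem pvA_inner_miss (rnd : List (String × String × String)) (y0 step x : Nat)
    (hs : 1 ≤ step) (out : List (List Char)) (q : Nat)
    (hmiss : ∀ i, i < rnd.length → q ≠ y0 + i * step) :
    (pvA_inner rnd y0 (step - 1) x out).getD q [] = out.getD q [] := by
  induction rnd generalizing y0 out with
  | nil => rfl
  | cons p rest ih =>
      show (pvA_inner rest (y0 + (step - 1) + 1) (step - 1) x (out.set y0 _)).getD q [] = _
      have hy : y0 + (step - 1) + 1 = y0 + step := by omega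
      rw [hy, ih (y0 + step) _ (fun i hi => by
        have := hmiss (i + 1) (by simpa using Nat.succ_lt_succ hi)
        intro hq; exact this (by rw [hq]; ring)) ]
      have hq0 : q ≠ y0 := by
        have := hmiss 0 (by simp)
        simpa using this
      simp [List.getD, List.getElem?_set_ne (Ne.symm hq0)]

-- a write sequence hits slot y0 + i*step
theorem pvA_inner_hit (rnd : List (String × String × String)) (y0 step x : Nat)
    (hs : 1 ≤ step) (out : List (List Char)) (i : Nat) (hi : i < rnd.length)
    (hlen : ∀ j, j < rnd.length → y0 + j * step < out.length) :
    (pvA_inner rnd y0 (step - 1) x out).getD (y0 + i * step) [] =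
      pvLineOf x (rnd.getD i ("", "", "")) := by
  induction rnd generalizing y0 out i with
  | nil => simp at hi
  | cons p rest ih =>
      show (pvA_inner rest (y0 + (step - 1) + 1) (step - 1) x (out.set y0 _)).getD _ [] = _
      have hy : y0 + (step - 1) + 1 = y0 + step := by omega
      rw [hy]
      cases i with
      | zero =>
          rw [pvA_inner_miss rest (y0 + step) step x hs _ _ (fun j hj => by
            intro hq; omega)]
          have h0 : y0 < out.length := by simpa using hlen 0 (by simp)
          simp [List.getD, h0, pvLineOf]
      | succ i' =>
          have harr : y0 + (i' + 1) * step = (y0 + step) + i' * step := by ring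
          rw [harr, ih (y0 + step) _ i' (by simpa using Nat.lt_of_succ_lt_succ (by simpa using hi))
            (fun j hj => by
              have := hlen (j + 1) (by simpa using Nat.succ_lt_succ hj)
              simp only [List.length_set]
              calc y0 + step + j * step = y0 + (j + 1) * step := by ring
                _ < out.length := this)]
          simp

-- odd part / valuation facts
theorem pvB_oddN_mul (n i : Nat) : pvB_oddN (2 ^ n * (2 * i + 1)) = (2 * i + 1, n) := by
  induction n with
  | zero =>
      rw [pvB_oddN, dif_neg (by omega)]
      simp
  | succ n ih =>
      have hne : 2 ^ n * (2 * i + 1) ≠ 0 := by positivity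
      have h2 : 2 ^ (n + 1) * (2 * i + 1) = 2 * (2 ^ n * (2 * i + 1)) := by ring
      rw [pvB_oddN, h2, dif_pos ⟨Nat.mul_mod_right 2 _, by omega⟩]
      have hdiv : 2 * (2 ^ n * (2 * i + 1)) / 2 = 2 ^ n * (2 * i + 1) := by omega
      simp only [hdiv, ih]

theorem pvB_oddN_spec (m : Nat) (hm : m ≠ 0) :
    m = 2 ^ (pvB_oddN m).2 * (pvB_oddN m).1 ∧ (pvB_oddN m).1 % 2 = 1 := by
  induction m using Nat.strong_induction_on with
  | _ m ih =>
      rw [pvB_oddN]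
      by_cases h : m % 2 = 0 ∧ m ≠ 0
      · simp only [dif_pos h]
        obtain ⟨h1, h2⟩ := ih (m / 2) (by omega) (by omega)
        constructor
        · have : 2 ^ ((pvB_oddN (m / 2)).2 + 1) * (pvB_oddN (m / 2)).1
              = 2 * (2 ^ (pvB_oddN (m / 2)).2 * (pvB_oddN (m / 2)).1) := by ring
          rw [this, ← h1]; omega
        · exact h2
      · simp only [dif_neg h]
        constructor
        · simp
        · omega

-- round-n slots are odd
theorem pv_slot_odd (k i : Nat) (hk : 1 ≤ k) : (2 ^ k - 1 + i * 2 ^ (k + 1)) % 2 = 1 := by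
  obtain ⟨k', rfl⟩ := Nat.exists_eq_add_of_le hk
  have h1 : 2 ^ (1 + k') = 2 * 2 ^ k' := by rw [pow_add]; ring
  have h2 : 2 ^ (1 + k' + 1) = 2 * 2 ^ (1 + k') := by rw [pow_succ]; ring
  have h3 : 1 ≤ 2 ^ k' := Nat.one_le_two_pow
  have h4 : i * 2 ^ (1 + k' + 1) = 2 * (i * 2 ^ (1 + k')) := by rw [h2]; ring
  omega

-- slot arithmetic: q = 2^n-1 + i*2^(n+1)  ↔  q+1 = 2^n * (2i+1)
theorem pv_slot_succ (n i : Nat) : 2 ^ n - 1 + i * 2 ^ (n + 1) + 1 = 2 ^ n * (2 * i + 1) := by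
  have h1 : 1 ≤ 2 ^ n := Nat.one_le_two_pow
  have h2 : 2 ^ (n + 1) = 2 * 2 ^ n := by rw [pow_succ]; ring
  have h3 : 2 ^ n * (2 * i + 1) = 2 ^ n + 2 * (i * 2 ^ n) := by ring
  have h4 : i * 2 ^ (n + 1) = 2 * (i * 2 ^ n) := by rw [h2]; ring
  omega

-- the A-loop over rounds n, n+1, … misses q (q hit by no remaining slot)
theorem pvA_loop_miss (status : List (String × Option String × Option String))
    (rest : List (List (String × String × String))) (n : Nat) (hn : 1 ≤ n)
    (out : List (List Char)) (q : Nat)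
    (hmiss : ∀ j i, j < rest.length → i < (rest.getD j []).length →
      q ≠ 2 ^ (n + j) - 1 + i * 2 ^ (n + j + 1)) :
    (pvA_loop status rest (2 ^ n - 1) (2 ^ (n + 1) - 1) (8 * n) n out).getD q [] = out.getD q [] := by
  induction rest generalizing n out with
  | nil => rfl
  | cons rnd rest' ih =>
      have hn0 : ¬ n = 0 := by omega
      simp only [pvA_loop, hn0, if_false]
      have h1 : (2 ^ (n + 1) - 1) * 2 + 1 = 2 ^ (n + 1 + 1) - 1 := by
        have h2 : 1 ≤ 2 ^ (n + 1) := Nat.one_le_two_pow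
        have : 2 ^ (n + 1 + 1) = 2 ^ (n + 1) * 2 := by rw [pow_succ]
        omega
      have h3 : 8 * n + 8 = 8 * (n + 1) := by ring
      rw [h1, h3, ih (n + 1) (by omega) _ (fun j i hj hi => by
        have := hmiss (j + 1) i (by simpa using Nat.succ_lt_succ hj) (by simpa using hi)
        simpa [Nat.add_assoc, Nat.add_comm 1 j, Nat.add_left_comm] using this)]
      exact pvA_inner_miss rnd (2 ^ n - 1) (2 ^ (n + 1)) (8 * n) Nat.one_le_two_pow out q
        (fun i hi => by simpa using hmiss 0 i (by simp) (by simpa using hi))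

-- the A-loop writes round n+j player i at its slot
theorem pvA_loop_hit (status : List (String × Option String × Option String))
    (rest : List (List (String × String × String))) (n : Nat) (hn : 1 ≤ n)
    (out : List (List Char)) (j i : Nat) (hj : j < rest.length)
    (hi : i < (rest.getD j []).length)
    (hlen : ∀ j' i', j' < rest.length → i' < (rest.getD j' []).length →
      2 ^ (n + j') - 1 + i' * 2 ^ (n + j' + 1) < out.length) :
    (pvA_loop status rest (2 ^ n - 1) (2 ^ (n + 1) - 1) (8 * n) n out).getD
        (2 ^ (n + j) - 1 + i * 2 ^ (n + j + 1)) []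
      = pvLineOf (8 * (n + j)) ((rest.getD j []).getD i ("", "", "")) := by
  induction rest generalizing n out j with
  | nil => simp at hj
  | cons rnd rest' ih =>
      have hn0 : ¬ n = 0 := by omega
      simp only [pvA_loop, hn0, if_false]
      have h1 : (2 ^ (n + 1) - 1) * 2 + 1 = 2 ^ (n + 1 + 1) - 1 := by
        have h2 : 1 ≤ 2 ^ (n + 1) := Nat.one_le_two_pow
        have : 2 ^ (n + 1 + 1) = 2 ^ (n + 1) * 2 := by rw [pow_succ]
        omega
      have h3 : 8 * n + 8 = 8 * (n + 1) := by ring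
      rw [h1, h3]
      cases j with
      | zero =>
          -- hit happens in this round; later rounds miss the slot (distinct 2-adic valuation)
          rw [pvA_loop_miss status rest' (n + 1) (by omega) _ _ (fun j' i' hj' hi' => by
            intro hq
            have e1 := pv_slot_succ (n + 0) i
            have e2 := pv_slot_succ (n + 1 + j') i'
            rw [hq] at e1
            have : (2 * i + 1, n + 0) = (2 * i' + 1, n + 1 + j') := by
              rw [← pvB_oddN_mul (n + 0) i, ← pvB_oddN_mul (n + 1 + j') i', ← e1, ← e2]
            have := congrArg Prod.snd this
            simp at this; omega)]
          have := pvA_inner_hit rnd (2 ^ n - 1) (2 ^ (n + 1)) (8 * n) Nat.one_le_two_pow out i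
            (by simpa using hi)
            (fun j' hj' => by simpa using hlen 0 j' (by simp) (by simpa using hj'))
          simpa using this
      | succ j' =>
          have ihx := ih (n + 1) (by omega) (pvA_inner rnd (2 ^ n - 1) (2 ^ (n + 1) - 1) (8 * n) out)
            j' (by simpa using Nat.lt_of_succ_lt_succ (by simpa using hj))
            (by simpa [Nat.add_assoc, Nat.add_comm 1 j', Nat.add_left_comm] using hi)
            (fun j'' i'' hj'' hi'' => by
              rw [pvA_inner_length]
              have := hlen (j'' + 1) i'' (by simpa using Nat.succ_lt_succ hj'')
                (by simpa using hi'')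
              simpa [Nat.add_assoc, Nat.add_comm 1 j'', Nat.add_left_comm] using this)
          simpa [Nat.add_assoc, Nat.add_comm 1 j', Nat.add_left_comm] using ihx

-- round 0: the base fold builds [line p0, '', line p1, '', …]
theorem pv_fold_eq_flatMap {α β : Type} (f : α → List β) (rnd : List α) (acc : List (List β)) :
    rnd.foldl (fun acc p => acc ++ [f p, []]) acc = acc ++ rnd.flatMap (fun p => [f p, []]) := by
  induction rnd generalizing acc with
  | nil => simp
  | cons p rest ih => simp [List.foldl_cons, ih]

theorem pv_flat_get {α β : Type} (f : α → List β) (rnd : List α) (d : α) (q : Nat) :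
    (rnd.flatMap (fun p => [f p, []])).getD q [] =
      if q < 2 * rnd.length then
        (if q % 2 = 0 then f (rnd.getD (q / 2) d) else [])
      else [] := by
  induction rnd generalizing q with
  | nil => simp [List.getD]
  | cons p rest ih =>
      match q with
      | 0 => simp [List.getD]
      | 1 => simp [List.getD]
      | (k + 2) =>
          have e1 : (k + 2) % 2 = k % 2 := by omega
          have e2 : (k + 2) / 2 = k / 2 + 1 := by omega
          have lhs : ((p :: rest).flatMap (fun p => [f p, []])).getD (k + 2) [] =
              (rest.flatMap (fun p => [f p, []])).getD k [] := by
            simp [List.getD]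
          rw [lhs, ih k]
          by_cases hk : k < 2 * rest.length
          · have h1 : k + 2 < 2 * (p :: rest).length := by
              simp only [List.length_cons]; omega
            rw [if_pos hk, if_pos h1, e1, e2]
            by_cases hm : k % 2 = 0
            · rw [if_pos hm, if_pos hm, List.getD_cons_succ]
            · rw [if_neg hm, if_neg hm]
          · have h1 : ¬ (k + 2 < 2 * (p :: rest).length) := by
              simp only [List.length_cons]; omega
            rw [if_neg hk, if_neg h1]

theorem pvA_base_get (status : List (String × Option String × Option String))
    (rnd : List (String × String × String)) (q : Nat) :
    (rnd.foldl (fun acc p => acc ++ [pvA_first status p, []]) []).getD q [] =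
      if q < 2 * rnd.length then
        (if q % 2 = 0 then pvA_first status (rnd.getD (q / 2) ("", "", "")) else [])
      else [] := by
  rw [pv_fold_eq_flatMap, List.nil_append, pv_flat_get]

theorem pvA_base_length (status : List (String × Option String × Option String))
    (rnd : List (String × String × String)) :
    (rnd.foldl (fun acc p => acc ++ [pvA_first status p, []]) []).length = 2 * rnd.length := by
  rw [pv_fold_eq_flatMap, List.nil_append]
  induction rnd with
  | nil => rfl
  | cons p rest ih =>
      rw [List.flatMap_cons, List.length_append, ih]
      simp only [List.length_cons, List.length_nil]
      omega

-- the heart: the A pipeline on a nonempty draw equals B's index-computed map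
theorem pv_main (status : List (String × Option String × Option String))
    (first : List (String × String × String)) (rest : List (List (String × String × String)))
    (hpre : Pre_drawsheet_print_draw (first :: rest) status) :
    pvA_loop status rest 1 3 8 1
        (first.foldl (fun acc p => acc ++ [pvA_first status p, []]) [])
      = (List.range (2 * first.length)).map (pvB_line (first :: rest) first status) := by
  have hbl : (first.foldl (fun acc p => acc ++ [pvA_first status p, []]) []).length
      = 2 * first.length := pvA_base_length status first
  have hlenB : ∀ j i, j < rest.length → i < (rest.getD j []).length →
      2 ^ (1 + j) - 1 + i * 2 ^ (1 + j + 1) <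
        (first.foldl (fun acc p => acc ++ [pvA_first status p, []]) []).length := by
    intro j i hj hi
    rw [hbl]
    have := hpre (j + 1) (by simp only [List.length_cons]; omega) (by omega) i
      (by simpa [List.getD_cons_succ] using hi)
    simpa [List.getD_cons_succ, Nat.add_comm 1 j] using this
  show pvA_loop status rest (2 ^ 1 - 1) (2 ^ (1 + 1) - 1) (8 * 1) 1 _ = _
  apply List.ext_getElem
  · rw [pvA_loop_length status rest _ _ _ _ (by omega), hbl]
    simp
  intro q h1 h2
  have hq : q < 2 * first.length := by simpa using h2
  rw [← List.getD_eq_getElem _ ([] : List Char) h1, ← List.getD_eq_getElem _ ([] : List Char) h2]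
  have hrhs : ((List.range (2 * first.length)).map (pvB_line (first :: rest) first status)).getD q []
      = pvB_line (first :: rest) first status q := by
    rw [List.getD_eq_getElem _ ([] : List Char) h2]
    simp
  rw [hrhs]
  by_cases hq2 : q % 2 = 0
  · -- even line: round-0 player line, never overwritten (all later slots are odd)
    rw [pvA_loop_miss status rest 1 (le_refl 1) _ q (fun j i hj hi => by
      intro heq
      have := pv_slot_odd (1 + j) i (by omega)
      rw [← heq] at this
      omega)]
    rw [pvA_base_get, if_pos hq, if_pos hq2]
    simp only [pvB_line, if_pos hq2]
    exact pvA_first_eq status _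
  · -- odd line: decode the owning round from the 2-adic valuation of q+1
    rcases he : pvB_oddN (q + 1) with ⟨od, n⟩
    have hspec := pvB_oddN_spec (q + 1) (by omega)
    rw [he] at hspec
    obtain ⟨hfact, hodd⟩ := hspec
    dsimp only at hfact hodd
    have hn1 : 1 ≤ n := by
      rcases Nat.eq_zero_or_pos n with h0 | h0
      · rw [h0, pow_zero, one_mul] at hfact; omega
      · exact h0
    by_cases hhit : n < (first :: rest).length ∧ od / 2 < ((first :: rest).getD n []).length
    · obtain ⟨hnlt, hilt⟩ := hhit
      obtain ⟨j, rfl⟩ : ∃ j, n = 1 + j := ⟨n - 1, by omega⟩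
      have hslot : q = 2 ^ (1 + j) - 1 + (od / 2) * 2 ^ (1 + j + 1) := by
        have hs := pv_slot_succ (1 + j) (od / 2)
        have : 2 * (od / 2) + 1 = od := by omega
        rw [this, ← hfact] at hs
        omega
      have hj : j < rest.length := by
        simp only [List.length_cons] at hnlt; omega
      have hgd : (first :: rest).getD (1 + j) ([] : List (String × String × String))
          = rest.getD j [] := by
        rw [Nat.add_comm]; simp
      have hA : (pvA_loop status rest (2 ^ 1 - 1) (2 ^ (1 + 1) - 1) (8 * 1) 1
            (first.foldl (fun acc p => acc ++ [pvA_first status p, []]) [])).getD q []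
          = pvLineOf (8 * (1 + j)) ((rest.getD j []).getD (od / 2) ("", "", "")) := by
        rw [hslot]
        exact pvA_loop_hit status rest 1 (le_refl 1) _ j (od / 2) hj
          (hgd ▸ hilt) hlenB
      rw [hA]
      have hcond : (od, 1 + j).2 < (first :: rest).length ∧
          (od, 1 + j).1 / 2 < ((first :: rest).getD ((od, 1 + j).2) []).length := ⟨hnlt, hilt⟩
      simp only [pvB_line, if_neg hq2, he, if_pos hcond]
      simp only [pvLineOf, hgd]
    · rw [pvA_loop_miss status rest 1 (le_refl 1) _ q (fun j i hj hi => by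
        intro heq
        have hm : q + 1 = 2 ^ (1 + j) * (2 * i + 1) := by
          rw [heq]; exact pv_slot_succ (1 + j) i
        have := pvB_oddN_mul (1 + j) i
        rw [← hm, he] at this
        injection this with hod' hn'
        have hod : od = 2 * i + 1 := hod'
        have hn : n = 1 + j := hn'
        refine hhit ⟨?_, ?_⟩
        · simp only [List.length_cons]; omega
        · rw [hn, hod]
          have h2 : (2 * i + 1) / 2 = i := by omega
          rw [h2]
          simpa [Nat.add_comm 1 j, List.getD_cons_succ] using hi)]
      rw [pvA_base_get, if_pos hq, if_neg hq2]
      simp only [pvB_line, if_neg hq2, he, if_neg hhit]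

-- ===== VERDICT =====
theorem drawsheet_print_draw_spec : Claim_equal_drawsheet_print_draw := by
  intro draw status _ hpre
  unfold Spec_drawsheet_print_draw drawsheet_print_draw drawsheet_print_draw_alt
  cases draw with
  | nil => rfl
  | cons first rest =>
      have h0 : pvA_loop status (first :: rest) 0 1 8 0 []
          = pvA_loop status rest 1 3 8 1
              (first.foldl (fun acc p => acc ++ [pvA_first status p, []]) []) := rfl
      rw [h0, pv_main status first rest hpre]
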